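-- pv_equiv track=rewrite | github.com/markjfisher/fn-rom | clean_impexp.py | generate_cleaned_lines
-- ===== SOURCE A (Python) =====
-- def generate_cleaned_lines(exports, imports, before_section, after_section):
--     """Generate the cleaned output lines."""
--     result_lines = []
--
--     # Sort exports alphabetically by symbol name
--     exports_sorted = sorted(exports, key=lambda x: x[2])
--
--     # Sort imports alphabetically by symbol name
--     imports_sorted = sorted(imports, key=lambda x: x[2])
--
--     # Add everything before the import/export section
--     for _, line in before_section:
--         result_lines.append(line)
--
--     # Add all exports (sorted)
--     for _, indent, symbol in exports_sorted:
--         result_lines.append(f"{indent}.export {symbol}")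
--
--     # Add a blank line between exports and imports if both exist
--     if exports_sorted and imports_sorted:
--         result_lines.append("")
--
--     # Add all imports (sorted)
--     for _, indent, symbol in imports_sorted:
--         result_lines.append(f"{indent}.import {symbol}")
--
--     # Add a blank line if we have exports/imports and other content
--     if (exports_sorted or imports_sorted) and after_section:
--         result_lines.append("")
--
--     # Add everything after the import/export section
--     for _, line in after_section:
--         result_lines.append(line)
--
--     return result_lines
-- ===== SOURCE B (Python) =====
-- def generate_cleaned_lines(exports, imports, before_section, after_section):
--     # Merge exports and imports into one tagged stream, sort it once by
--     # (tag, symbol) -- stable, so each group keeps A's per-group order --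
--     # and emit the blank separator when the tag switches from 0 to 1.
--     tagged = [(0, ind, sym) for _, ind, sym in exports] + \
--              [(1, ind, sym) for _, ind, sym in imports]
--     tagged.sort(key=lambda t: (t[0], t[2]))
--     mid = []
--     prev = None
--     for tag, ind, sym in tagged:
--         if prev == 0 and tag == 1:
--             mid.append("")
--         mid.append(f"{ind}.{'export' if tag == 0 else 'import'} {sym}")
--         prev = tag
--     out = [line for _, line in before_section] + mid
--     if mid and after_section:
--         out.append("")
--     out.extend(line for _, line in after_section)
--     return out
-- ===== Notes on version B (the rewrite author's own statement) =====
-- stated objective: alternative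
-- what changed: B replaces A's two separate sorts plus four append loops with guarded blanks by one stable sort of a tagged union of exports and imports keyed by (tag, symbol), then a single pass over the merged stream that emits the blank separator exactly at the 0-to-1 tag transition.
import Mathlib
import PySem

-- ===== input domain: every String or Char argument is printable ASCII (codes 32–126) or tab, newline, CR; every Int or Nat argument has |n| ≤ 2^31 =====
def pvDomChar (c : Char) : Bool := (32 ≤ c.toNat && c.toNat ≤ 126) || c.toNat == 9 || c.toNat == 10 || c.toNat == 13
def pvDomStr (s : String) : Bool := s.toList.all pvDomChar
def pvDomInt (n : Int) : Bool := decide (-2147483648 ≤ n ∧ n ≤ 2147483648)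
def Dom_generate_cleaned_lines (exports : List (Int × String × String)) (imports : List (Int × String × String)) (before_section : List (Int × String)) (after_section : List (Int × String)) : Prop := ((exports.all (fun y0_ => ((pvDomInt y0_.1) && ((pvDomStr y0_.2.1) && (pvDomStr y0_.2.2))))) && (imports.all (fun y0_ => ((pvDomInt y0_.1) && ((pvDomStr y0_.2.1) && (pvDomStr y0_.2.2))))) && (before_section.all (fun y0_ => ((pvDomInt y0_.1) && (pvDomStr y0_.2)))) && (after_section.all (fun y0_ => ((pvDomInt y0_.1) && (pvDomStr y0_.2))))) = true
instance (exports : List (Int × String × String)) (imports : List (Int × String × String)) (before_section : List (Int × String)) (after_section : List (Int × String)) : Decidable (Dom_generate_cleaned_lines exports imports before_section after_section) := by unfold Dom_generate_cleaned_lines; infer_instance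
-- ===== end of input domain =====

-- B merges exports and imports into one tagged stream, sorts it once by (tag, symbol) and
-- emits the blank separator in a single pass at the tag transition (objective: alternative).

-- ===== PORT A =====
def generate_cleaned_lines (exports : List (Int × String × String)) (imports : List (Int × String × String)) (before_section : List (Int × String)) (after_section : List (Int × String)) : List String :=
  let result_lines : List String := []
  let exports_sorted := PySem.List.sorted exports (fun x => x.2.2) false
  let imports_sorted := PySem.List.sorted imports (fun x => x.2.2) false
  let result_lines := before_section.foldl (fun acc p => acc ++ [p.2]) result_lines
  let result_lines := exports_sorted.foldl (fun acc x => acc ++ [x.2.1 ++ ".export " ++ x.2.2]) result_lines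
  let result_lines := if !exports_sorted.isEmpty && !imports_sorted.isEmpty then result_lines ++ [""] else result_lines
  let result_lines := imports_sorted.foldl (fun acc x => acc ++ [x.2.1 ++ ".import " ++ x.2.2]) result_lines
  let result_lines := if (!exports_sorted.isEmpty || !imports_sorted.isEmpty) && !after_section.isEmpty then result_lines ++ [""] else result_lines
  let result_lines := after_section.foldl (fun acc p => acc ++ [p.2]) result_lines
  result_lines

-- ===== PORT B =====
-- one step of Source B's single pass over the merged tagged stream (state: lines so far, previous tag)
def pvStep (s : List String × Option Int) (t : Int × String × String) : List String × Option Int :=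
  let mid := if s.2 = some 0 ∧ t.1 = 1 then s.1 ++ [""] else s.1
  (mid ++ [t.2.1 ++ (if t.1 = (0 : Int) then ".export " else ".import ") ++ t.2.2], some t.1)

def generate_cleaned_lines_alt (exports : List (Int × String × String)) (imports : List (Int × String × String)) (before_section : List (Int × String)) (after_section : List (Int × String)) : List String :=
  let tagged : List (Int × String × String) :=
    exports.map (fun x => ((0 : Int), x.2.1, x.2.2)) ++ imports.map (fun x => ((1 : Int), x.2.1, x.2.2))
  let tagged := PySem.List.sorted2 tagged (fun t => t.1) (fun t => t.2.2) false
  let mid := (tagged.foldl pvStep ([], none)).1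
  let out := before_section.map (fun p => p.2) ++ mid
  let out := if !mid.isEmpty && !after_section.isEmpty then out ++ [""] else out
  out ++ after_section.map (fun p => p.2)

-- ===== PRECONDITION & SPEC =====
def Spec_generate_cleaned_lines (exports : List (Int × String × String)) (imports : List (Int × String × String)) (before_section : List (Int × String)) (after_section : List (Int × String)) (out : List String) : Prop := out = generate_cleaned_lines_alt exports imports before_section after_section
instance (exports : List (Int × String × String)) (imports : List (Int × String × String)) (before_section : List (Int × String)) (after_section : List (Int × String)) (out : List String) : Decidable (Spec_generate_cleaned_lines exports imports before_section after_section out) := by unfold Spec_generate_cleaned_lines; infer_instance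

-- ===== CLAIM =====
def Claim_equal_generate_cleaned_lines : Prop := ∀ (exports : List (Int × String × String)) (imports : List (Int × String × String)) (before_section : List (Int × String)) (after_section : List (Int × String)), Dom_generate_cleaned_lines exports imports before_section after_section → Spec_generate_cleaned_lines exports imports before_section after_section (generate_cleaned_lines exports imports before_section after_section)

-- ===== LEMMAS AND PROOFS =====
theorem foldl_append_singleton {α β : Type} (f : α → β) (l : List α) (init : List β) :
    l.foldl (fun acc x => acc ++ [f x]) init = init ++ l.map f := by
  induction l generalizing init with
  | nil => simp
  | cons a t ih => simp [List.foldl, ih]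

theorem insertBy_skip {α : Type} (b : α → α → Bool) (x : α) (pre ys : List α)
    (h : ∀ y ∈ pre, b x y = false) :
    PySem.List.insertBy b x (pre ++ ys) = pre ++ PySem.List.insertBy b x ys := by
  induction pre with
  | nil => simp
  | cons p t ih =>
      have hp : b x p = false := h p (by simp)
      simp [PySem.List.insertBy, hp, ih (fun y hy => h y (by simp [hy]))]

theorem insertBy_map {α β : Type} (b : β → β → Bool) (b' : α → α → Bool) (g : α → β)
    (hb : ∀ a c, b (g a) (g c) = b' a c) (x : α) (ys : List α) :
    PySem.List.insertBy b (g x) (ys.map g) = (PySem.List.insertBy b' x ys).map g := by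
  induction ys with
  | nil => simp [PySem.List.insertBy]
  | cons y t ih =>
      simp only [List.map_cons, PySem.List.insertBy, hb]
      by_cases h : b' x y = true
      · simp [h]
      · simp [h, ih]

theorem foldl_ins_map {α β : Type} (b : β → β → Bool) (b' : α → α → Bool) (g : α → β)
    (hb : ∀ a c, b (g a) (g c) = b' a c) (xs : List α) :
    ∀ acc : List α,
      (xs.map g).foldl (fun a x => PySem.List.insertBy b x a) (acc.map g)
        = (xs.foldl (fun a x => PySem.List.insertBy b' x a) acc).map g := by
  induction xs with
  | nil => intro acc; simp
  | cons x t ih =>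
      intro acc
      simp only [List.map_cons, List.foldl_cons]
      rw [insertBy_map b b' g hb, ih]

theorem foldl_ins_prefix {α : Type} (b : α → α → Bool) (zs : List α) :
    ∀ (pre acc : List α), (∀ x ∈ zs, ∀ y ∈ pre, b x y = false) →
      zs.foldl (fun a x => PySem.List.insertBy b x a) (pre ++ acc)
        = pre ++ zs.foldl (fun a x => PySem.List.insertBy b x a) acc := by
  induction zs with
  | nil => intro pre acc _; simp
  | cons z t ih =>
      intro pre acc h
      simp only [List.foldl_cons]
      rw [insertBy_skip b z pre acc (fun y hy => h z (by simp) y hy),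
        ih pre _ (fun x hx y hy => h x (by simp [hx]) y hy)]

-- per-element formatting used by the single pass
theorem pass_zero (l : List (Int × String × String)) (h : ∀ t ∈ l, t.1 = 0) :
    ∀ (acc : List String) (p : Option Int),
      l.foldl pvStep (acc, p)
        = (acc ++ l.map (fun t => t.2.1 ++ (if t.1 = (0 : Int) then ".export " else ".import ") ++ t.2.2),
           if l = [] then p else some 0) := by
  induction l with
  | nil => intro acc p; simp
  | cons t r ih =>
      intro acc p
      have ht : t.1 = 0 := h t (by simp)
      have step : pvStep (acc, p) t
          = (acc ++ [t.2.1 ++ (if t.1 = (0 : Int) then ".export " else ".import ") ++ t.2.2], some t.1) := by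
        simp [pvStep, ht]
      simp only [List.foldl_cons, step, ht, ih (fun x hx => h x (by simp [hx]))]
      cases r <;> simp [ht]

theorem pass_one (l : List (Int × String × String)) (h : ∀ t ∈ l, t.1 = 1) :
    ∀ (acc : List String) (p : Option Int),
      l.foldl pvStep (acc, p)
        = (acc ++ (if p = some 0 ∧ l ≠ [] then [""] else [])
             ++ l.map (fun t => t.2.1 ++ (if t.1 = (0 : Int) then ".export " else ".import ") ++ t.2.2),
           if l = [] then p else some 1) := by
  induction l with
  | nil => intro acc p; simp
  | cons t r ih =>
      intro acc p
      have ht : t.1 = 1 := h t (by simp)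
      have step : pvStep (acc, p) t
          = ((if p = some 0 then acc ++ [""] else acc)
              ++ [t.2.1 ++ (if t.1 = (0 : Int) then ".export " else ".import ") ++ t.2.2], some t.1) := by
        by_cases hp : p = some 0 <;> simp [pvStep, ht, hp]
      simp only [List.foldl_cons, step, ht, ih (fun x hx => h x (by simp [hx]))]
      by_cases hp : p = some 0 <;> cases r <;> simp [hp, ht]

-- the single stable sort of the tagged union splits into the two per-group sorts
theorem sorted2_tagged_split (E I : List (Int × String × String)) :
    PySem.List.sorted2
        (E.map (fun x => ((0 : Int), x.2.1, x.2.2)) ++ I.map (fun x => ((1 : Int), x.2.1, x.2.2)))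
        (fun t => t.1) (fun t => t.2.2) false
      = (PySem.List.sorted E (fun x => x.2.2) false).map (fun x => ((0 : Int), x.2.1, x.2.2))
        ++ (PySem.List.sorted I (fun x => x.2.2) false).map (fun x => ((1 : Int), x.2.1, x.2.2)) := by
  have hb0 : ∀ a c : Int × String × String,
      (decide (((0 : Int), a.2.1, a.2.2).1 < ((0 : Int), c.2.1, c.2.2).1)
        || (!decide (((0 : Int), c.2.1, c.2.2).1 < ((0 : Int), a.2.1, a.2.2).1)
            && decide (((0 : Int), a.2.1, a.2.2).2.2 < ((0 : Int), c.2.1, c.2.2).2.2)))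
        = decide (a.2.2 < c.2.2) := by intro a c; simp
  have hb1 : ∀ a c : Int × String × String,
      (decide (((1 : Int), a.2.1, a.2.2).1 < ((1 : Int), c.2.1, c.2.2).1)
        || (!decide (((1 : Int), c.2.1, c.2.2).1 < ((1 : Int), a.2.1, a.2.2).1)
            && decide (((1 : Int), a.2.1, a.2.2).2.2 < ((1 : Int), c.2.1, c.2.2).2.2)))
        = decide (a.2.2 < c.2.2) := by intro a c; simp
  simp only [PySem.List.sorted2, if_neg (by decide : ¬ (false = true)), List.foldl_append]
  have hE := foldl_ins_map
      (fun a c : Int × String × String =>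
        decide (a.1 < c.1) || (!decide (c.1 < a.1) && decide (a.2.2 < c.2.2)))
      (fun a c : Int × String × String => decide (a.2.2 < c.2.2))
      (fun x => ((0 : Int), x.2.1, x.2.2)) hb0 E []
  have hI := foldl_ins_map
      (fun a c : Int × String × String =>
        decide (a.1 < c.1) || (!decide (c.1 < a.1) && decide (a.2.2 < c.2.2)))
      (fun a c : Int × String × String => decide (a.2.2 < c.2.2))
      (fun x => ((1 : Int), x.2.1, x.2.2)) hb1 I []
  simp only [List.map_nil] at hE hI
  rw [hE]
  rw [show (E.foldl (fun a x => PySem.List.insertBy (fun a c : Int × String × String => decide (a.2.2 < c.2.2)) x a) []).map (fun x => ((0 : Int), x.2.1, x.2.2))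
      = (E.foldl (fun a x => PySem.List.insertBy (fun a c : Int × String × String => decide (a.2.2 < c.2.2)) x a) []).map (fun x => ((0 : Int), x.2.1, x.2.2)) ++ [] from by simp]
  rw [foldl_ins_prefix _ _ _ []
      (by
        intro x hx y hy
        simp only [List.mem_map] at hx hy
        obtain ⟨a, -, rfl⟩ := hx
        obtain ⟨c, -, rfl⟩ := hy
        simp)]
  rw [hI, PySem.List.sorted_eq_foldl_insertBy E (fun x => x.2.2),
      PySem.List.sorted_eq_foldl_insertBy I (fun x => x.2.2)]

theorem fmt_comp_zero :
    ((fun t : Int × String × String => (t.2.1 ++ if t.1 = (0 : Int) then ".export " else ".import ") ++ t.2.2)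
        ∘ fun x : Int × String × String => ((0 : Int), x.2))
      = fun x : Int × String × String => x.2.1 ++ ".export " ++ x.2.2 := by
  funext x; simp

theorem fmt_comp_one :
    ((fun t : Int × String × String => (t.2.1 ++ if t.1 = (0 : Int) then ".export " else ".import ") ++ t.2.2)
        ∘ fun x : Int × String × String => ((1 : Int), x.2))
      = fun x : Int × String × String => x.2.1 ++ ".import " ++ x.2.2 := by
  funext x; simp

-- ===== VERDICT =====
theorem generate_cleaned_lines_spec : Claim_equal_generate_cleaned_lines := by
  intro exports imports before_section after_section _
  unfold Spec_generate_cleaned_lines generate_cleaned_lines generate_cleaned_lines_alt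
  simp only [sorted2_tagged_split, List.foldl_append]
  rw [pass_zero _ (by intro t ht; simp only [List.mem_map] at ht; obtain ⟨a, -, rfl⟩ := ht; rfl) [] none]
  rw [pass_one _ (by intro t ht; simp only [List.mem_map] at ht; obtain ⟨a, -, rfl⟩ := ht; rfl)]
  simp only [foldl_append_singleton, List.map_map, fmt_comp_zero, fmt_comp_one]
  cases he : PySem.List.sorted exports (fun x => x.2.2) false <;>
  cases hi : PySem.List.sorted imports (fun x => x.2.2) false <;>
  cases after_section <;>
    simp_all
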